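-- pv_equiv track=rewrite | github.com/hienhoceo-dpsmedia/wordpress-security-with-nginx-on-fastpanel | scripts/update-googlebot-map.py | dedupe_and_sort_prefixes
-- ===== SOURCE A (Python) =====
-- from typing import Iterable, List
--
-- class GooglebotMapError(Exception):
--     """Raised when the Googlebot map cannot be generated."""
--
-- def dedupe_and_sort_prefixes(prefixes: Iterable[str]) -> List[str]:
--     """Remove duplicates while ensuring IPv4 blocks appear before IPv6."""
--     seen = set()
--     ipv4: List[str] = []
--     ipv6: List[str] = []
--
--     for prefix in prefixes:
--         if prefix in seen:
--             continue
--         seen.add(prefix)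
--         if ":" in prefix:
--             ipv6.append(prefix)
--         else:
--             ipv4.append(prefix)
--
--     ipv4_sorted = sorted(ipv4)
--     ipv6_sorted = sorted(ipv6)
--     combined = ipv4_sorted + ipv6_sorted
--     if not combined:
--         raise GooglebotMapError("No Google crawler prefixes discovered across all sources")
--     return combined
-- ===== SOURCE B (Python) =====
-- from typing import Iterable, List
--
--
-- class GooglebotMapError(Exception):
--     """Raised when the Googlebot map cannot be generated."""
--
--
-- def dedupe_and_sort_prefixes(prefixes: Iterable[str]) -> List[str]:
--     """Remove duplicates while ensuring IPv4 blocks appear before IPv6."""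
--     combined = sorted(set(prefixes), key=lambda p: (":" in p, p))
--     if not combined:
--         raise GooglebotMapError("No Google crawler prefixes discovered across all sources")
--     return combined
-- ===== Notes on version B (the rewrite author's own statement) =====
-- stated objective: simpler
-- what changed: Replaces the seen-set loop that partitions into two lists and sorts each with a single keyed sort of set(prefixes) using the composite key (':' in p, p), which puts IPv4 before IPv6 and sorts each group lexicographically.
import Mathlib
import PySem

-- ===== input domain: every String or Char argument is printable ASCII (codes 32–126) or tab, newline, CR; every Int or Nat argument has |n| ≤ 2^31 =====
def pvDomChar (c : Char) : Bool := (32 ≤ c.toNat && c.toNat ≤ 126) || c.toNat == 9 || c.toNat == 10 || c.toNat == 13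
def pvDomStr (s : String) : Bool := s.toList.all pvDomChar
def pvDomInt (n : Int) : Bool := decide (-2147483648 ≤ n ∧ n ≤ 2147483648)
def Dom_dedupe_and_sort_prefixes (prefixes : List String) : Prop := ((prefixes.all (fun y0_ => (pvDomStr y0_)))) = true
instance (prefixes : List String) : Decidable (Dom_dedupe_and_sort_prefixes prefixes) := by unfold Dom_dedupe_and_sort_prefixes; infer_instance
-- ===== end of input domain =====

-- B replaces A's seen-set partition into two lists with two sorts by a single
-- keyed sort of the deduplicated input (objective: simpler).

-- ===== PORT A =====
-- loop body: 'if px in seen: continue; seen.add(prefix); if ":" in prefix: ipv6.append else ipv4.append'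
def dedupe_and_sort_prefixes_loopStep (st : PySem.Set String × List String × List String)
    (px : String) : PySem.Set String × List String × List String :=
  if PySem.Set.contains st.1 px then st
  else
    let seen := PySem.Set.add st.1 px
    if PySem.Str.isIn ":" px then (seen, st.2.1, st.2.2 ++ [px])
    else (seen, st.2.1 ++ [px], st.2.2)

-- On [] the Python raises GooglebotMapError ('if not combined: raise'); Pre_ excludes that input.
def dedupe_and_sort_prefixes (prefixes : List String) : List String :=
  let st := prefixes.foldl dedupe_and_sort_prefixes_loopStep (PySem.Set.empty, [], [])
  let ipv4_sorted := PySem.List.sorted st.2.1 (fun p => p)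
  let ipv6_sorted := PySem.List.sorted st.2.2 (fun p => p)
  ipv4_sorted ++ ipv6_sorted

-- ===== PORT B =====
def dedupe_and_sort_prefixes_alt (prefixes : List String) : List String :=
  PySem.List.sorted2 (PySem.Set.ofList prefixes) (fun p => PySem.Str.isIn ":" p) (fun p => p)

-- ===== PRECONDITION & SPEC =====
-- Pre_ excludes only the empty list, on which A (and B) raise GooglebotMapError.
def Pre_dedupe_and_sort_prefixes (prefixes : List String) : Prop := prefixes ≠ []
instance (prefixes : List String) : Decidable (Pre_dedupe_and_sort_prefixes prefixes) := by
  unfold Pre_dedupe_and_sort_prefixes; infer_instance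

def pvWitness_dedupe_and_sort_prefixes : List String := ["2001:db8::/32", "8.8.8.0/24", "1.1.1.0/24", "8.8.8.0/24"]

def Spec_dedupe_and_sort_prefixes (prefixes : List String) (out : List String) : Prop := out = dedupe_and_sort_prefixes_alt prefixes
instance (prefixes : List String) (out : List String) : Decidable (Spec_dedupe_and_sort_prefixes prefixes out) := by unfold Spec_dedupe_and_sort_prefixes; infer_instance

-- ===== CLAIM (what is proved, stated in full; the proofs are below) =====
def Claim_equal_dedupe_and_sort_prefixes : Prop := ∀ (prefixes : List String), Dom_dedupe_and_sort_prefixes prefixes → Pre_dedupe_and_sort_prefixes prefixes → Spec_dedupe_and_sort_prefixes prefixes (dedupe_and_sort_prefixes prefixes)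

-- ===== LEMMAS AND PROOFS =====

-- the fresh first occurrences of l relative to a seen-set s
def pvNewElems (s : PySem.Set String) : List String → List String
  | [] => []
  | x :: l => if PySem.Set.contains s x then pvNewElems s l
              else x :: pvNewElems (PySem.Set.add s x) l

lemma pvLoop_spec (l : List String) : ∀ (s : PySem.Set String) (v4 v6 : List String),
    l.foldl dedupe_and_sort_prefixes_loopStep (s, v4, v6)
      = (PySem.Set.update s l,
         v4 ++ (pvNewElems s l).filter (fun p => !PySem.Str.isIn ":" p),
         v6 ++ (pvNewElems s l).filter (fun p => PySem.Str.isIn ":" p)) := by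
  induction l with
  | nil => intro s v4 v6; simp [pvNewElems, PySem.Set.update]
  | cons x l ih =>
    intro s v4 v6
    by_cases hc : PySem.Set.contains s x
    · have hm : x ∈ s := by simpa using hc
      have hadd : PySem.Set.add s x = s := by simp [PySem.Set.add, hm]
      simp only [List.foldl_cons, dedupe_and_sort_prefixes_loopStep, hc, if_pos,
        pvNewElems, PySem.Set.update]
      rw [ih s v4 v6]
      simp [PySem.Set.update, hm]
    · have hm : ¬ x ∈ s := by simpa using hc
      by_cases hi : PySem.Str.isIn ":" x
      · have hi' : PySem.Chars.isIn [':'] x.toList = true := by simpa using hi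
        simp only [List.foldl_cons, dedupe_and_sort_prefixes_loopStep, hc, if_neg,
          Bool.false_eq_true, not_false_iff, hi, if_pos]
        rw [ih (PySem.Set.add s x) v4 (v6 ++ [x])]
        simp [PySem.Set.update, pvNewElems, hm, hi']
      · have hi' : PySem.Chars.isIn [':'] x.toList = false := by simpa using hi
        simp only [List.foldl_cons, dedupe_and_sort_prefixes_loopStep, hc, if_neg,
          Bool.false_eq_true, not_false_iff, hi]
        rw [ih (PySem.Set.add s x) (v4 ++ [x]) v6]
        simp [PySem.Set.update, pvNewElems, hm, hi']

lemma pvUpdate_eq_append_newElems (l : List String) : ∀ (s : PySem.Set String),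
    PySem.Set.update s l = s ++ pvNewElems s l := by
  induction l with
  | nil => intro s; simp [pvNewElems, PySem.Set.update]
  | cons x l ih =>
    intro s
    by_cases hc : PySem.Set.contains s x
    · have hm : x ∈ s := by simpa using hc
      have hadd : PySem.Set.add s x = s := by simp [PySem.Set.add, hm]
      simp only [PySem.Set.update, List.foldl_cons, hadd]
      have hne : pvNewElems s (x :: l) = pvNewElems s l := by
        simp [pvNewElems, hm]
      rw [hne]
      simpa [PySem.Set.update] using ih s
    · have hm : ¬ x ∈ s := by simpa using hc
      have hadd : PySem.Set.add s x = s ++ [x] := by simp [PySem.Set.add, hm]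
      simp only [PySem.Set.update, List.foldl_cons, pvNewElems, hc, if_neg,
        Bool.false_eq_true, not_false_iff]
      have := ih (PySem.Set.add s x)
      simp only [PySem.Set.update] at this
      rw [this, hadd]
      simp

lemma pvNewElems_nil_eq_ofList (l : List String) :
    pvNewElems PySem.Set.empty l = PySem.Set.ofList l := by
  have h := pvUpdate_eq_append_newElems l PySem.Set.empty
  simp [PySem.Set.update, PySem.Set.ofList, PySem.Set.empty] at h ⊢
  exact h.symm

-- sorted2 with linear-order keys is sorted by the lexicographic pair key
lemma pvSorted2_eq_sorted_lex (xs : List String) (k1 : String → Bool) (k2 : String → String) :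
    PySem.List.sorted2 xs k1 k2 = PySem.List.sorted xs (fun x => toLex (k1 x, k2 x)) := by
  have hbf : ∀ a b : String,
      (decide (k1 a < k1 b) || (!decide (k1 b < k1 a) && decide (k2 a < k2 b)))
        = decide (toLex (k1 a, k2 a) < toLex (k1 b, k2 b)) := by
    intro a b
    by_cases h1 : k1 a < k1 b
    · simp [h1, Prod.Lex.lt_iff]
    · by_cases h2 : k1 b < k1 a
      · have hne : k1 a ≠ k1 b := fun h => absurd h2 (by simp [h])
        simp [h1, h2, Prod.Lex.lt_iff, hne]
      · have heq : k1 a = k1 b := le_antisymm (not_lt.mp h2) (not_lt.mp h1)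
        simp [Prod.Lex.lt_iff, heq]
  simp only [PySem.List.sorted2, PySem.List.sorted]
  congr 1
  funext acc x
  congr 1
  funext a b
  exact hbf a b

lemma pvPairwise_lt_of_sorted_nodup (xs : List String) (h : xs.Nodup) :
    (PySem.List.sorted xs (fun p => p)).Pairwise (fun a b => a < b) := by
  have hle := PySem.List.sorted_pairwise xs (fun p => p)
  have hnd : (PySem.List.sorted xs (fun p => p)).Nodup :=
    (PySem.List.sorted_perm xs (fun p => p) false).nodup_iff.mpr h
  exact (hle.and hnd).imp (fun hx => lt_of_le_of_ne hx.1 hx.2)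

-- ===== VERDICT (by name: the statement is the Claim_ definition above) =====
theorem dedupe_and_sort_prefixes_spec : Claim_equal_dedupe_and_sort_prefixes := by
  intro prefixes _ _
  unfold Spec_dedupe_and_sort_prefixes
  unfold dedupe_and_sort_prefixes dedupe_and_sort_prefixes_alt
  rw [pvLoop_spec]
  simp only
  rw [pvNewElems_nil_eq_ofList]
  set D := PySem.Set.ofList prefixes with hD
  have hDnd : D.Nodup := by
    rw [hD, ← PySem.List.dedup_eq_ofList]; exact PySem.List.nodup_dedup prefixes
  set l4 := D.filter (fun p => !PySem.Str.isIn ":" p) with hl4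
  set l6 := D.filter (fun p => PySem.Str.isIn ":" p) with hl6
  rw [pvSorted2_eq_sorted_lex]
  apply Eq.symm
  apply PySem.List.sorted_eq_of_perm_of_pairwise_lt
  · -- the concatenation is a permutation of the deduplicated input
    refine ((PySem.List.sorted_perm _ _ _).append (PySem.List.sorted_perm _ _ _)).trans ?_
    have := List.filter_append_perm (fun q => !PySem.Str.isIn ":" q) D
    simpa [hl4, hl6] using this
  · -- and strictly increasing under the lexicographic key
    have hmem4 : ∀ a ∈ PySem.List.sorted l4 (fun p => p), PySem.Str.isIn ":" a = false := by
      intro a ha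
      have : a ∈ l4 := (PySem.List.mem_sorted _ _ _ _).mp ha
      have := (List.mem_filter.mp (hl4 ▸ this)).2
      simpa using this
    have hmem6 : ∀ a ∈ PySem.List.sorted l6 (fun p => p), PySem.Str.isIn ":" a = true := by
      intro a ha
      have : a ∈ l6 := (PySem.List.mem_sorted _ _ _ _).mp ha
      exact (List.mem_filter.mp (hl6 ▸ this)).2
    apply List.pairwise_append.mpr
    refine ⟨?_, ?_, ?_⟩
    · refine List.Pairwise.imp_of_mem ?_ (pvPairwise_lt_of_sorted_nodup l4 (hDnd.filter _))
      intro a b ha hb hab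
      have h1 : PySem.Chars.isIn [':'] a.toList = false := by simpa using hmem4 a ha
      have h2 : PySem.Chars.isIn [':'] b.toList = false := by simpa using hmem4 b hb
      simp [Prod.Lex.lt_iff, h1, h2, hab]
    · refine List.Pairwise.imp_of_mem ?_ (pvPairwise_lt_of_sorted_nodup l6 (hDnd.filter _))
      intro a b ha hb hab
      have h1 : PySem.Chars.isIn [':'] a.toList = true := by simpa using hmem6 a ha
      have h2 : PySem.Chars.isIn [':'] b.toList = true := by simpa using hmem6 b hb
      simp [Prod.Lex.lt_iff, h1, h2, hab]
    · intro a ha b hb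
      have h1 : PySem.Chars.isIn [':'] a.toList = false := by simpa using hmem4 a ha
      have h2 : PySem.Chars.isIn [':'] b.toList = true := by simpa using hmem6 b hb
      simp [Prod.Lex.lt_iff, h1, h2]
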